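-- pv_equiv track=rewrite | github.com/AlexReyes03/chat-socket-python | src/utils/utils.py | limpiar_caracteres_repetidos
-- ===== SOURCE A (Python) =====
-- def limpiar_caracteres_repetidos(texto):
--     resultado = ""
--     char_anterior = ""
--     contador = 0
--
--     for char in texto:
--         if char.lower() == char_anterior.lower() and char.isalpha():
--             contador += 1
--             if contador <= 5:
--                 resultado += char
--         else:
--             contador = 1
--             resultado += char
--         char_anterior = char
--
--     final = ""
--     char_anterior = ""
--     contador = 0
--
--     for char in resultado:
--         if char.lower() == char_anterior.lower() and char.isalpha():
--             contador += 1
--             if contador > 5: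
--                 continue
--             else:
--                 final += char
--         else:
--             if contador > 5 and char_anterior:
--                 if not final.endswith(char_anterior):
--                     final += char_anterior
--             contador = 1
--             final += char
--         char_anterior = char
--
--     if contador > 5 and char_anterior:
--         while final.endswith(char_anterior) and final.count(char_anterior[-1:]) > 1:
--             final = final[:-1]
--
--     return final
-- ===== SOURCE B (Python) =====
-- from itertools import groupby
--
-- def limpiar_caracteres_repetidos(texto):
--     piezas = []
--     for _, grupo in groupby(texto, key=lambda c: c.lower() if c.isalpha() else c):
--         run = list(grupo)
--         if run[0].isalpha():
--             piezas.extend(run[:5])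
--         else:
--             piezas.extend(run)
--     return ''.join(piezas)
-- ===== Notes on version B (the rewrite author's own statement) =====
-- stated objective: simpler
-- what changed: B replaces A's two sequential character-by-character scans plus a dead endswith/count trailing-cleanup loop with a single itertools.groupby pass over case-insensitive runs, keeping at most 5 chars of each alphabetic run and whole non-alphabetic runs.
import Mathlib
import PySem

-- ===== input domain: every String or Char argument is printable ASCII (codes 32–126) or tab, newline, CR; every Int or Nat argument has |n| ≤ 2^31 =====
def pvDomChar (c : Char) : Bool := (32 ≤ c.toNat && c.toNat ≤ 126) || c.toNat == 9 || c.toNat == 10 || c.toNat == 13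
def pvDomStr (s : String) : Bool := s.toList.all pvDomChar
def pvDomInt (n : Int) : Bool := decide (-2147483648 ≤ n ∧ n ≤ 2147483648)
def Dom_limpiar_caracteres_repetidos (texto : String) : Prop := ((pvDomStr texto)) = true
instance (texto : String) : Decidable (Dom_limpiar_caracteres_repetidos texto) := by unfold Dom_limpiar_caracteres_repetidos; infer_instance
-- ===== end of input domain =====

-- B replaces A's two character-by-character passes plus trailing cleanup with a single
-- grouping pass (itertools.groupby) capping each case-insensitive alphabetic run at 5; objective: simpler.

-- ===== PORT A =====
-- one step of A's first for-loop; state = (resultado, char_anterior, contador)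
def pvLimpiarStep1 (s : List Char × List Char × Int) (c : Char) : List Char × List Char × Int :=
  if (PySem.Chars.lower [c] == PySem.Chars.lower s.2.1) && PySem.Chars.isalpha c then
    (if s.2.2 + 1 ≤ 5 then s.1 ++ [c] else s.1, [c], s.2.2 + 1)
  else
    (s.1 ++ [c], [c], 1)

-- one step of A's second for-loop; state = (final, char_anterior, contador)
def pvLimpiarStep2 (s : List Char × List Char × Int) (c : Char) : List Char × List Char × Int :=
  if (PySem.Chars.lower [c] == PySem.Chars.lower s.2.1) && PySem.Chars.isalpha c then
    (if 5 < s.2.2 + 1 then s.1 else s.1 ++ [c], [c], s.2.2 + 1)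
  else
    ((if 5 < s.2.2 ∧ s.2.1 ≠ [] then
        (if PySem.Chars.endswith s.1 s.2.1 then s.1 else s.1 ++ s.2.1)
      else s.1) ++ [c], [c], 1)

-- A's trailing while-loop; fuel = final.length bounds its iterations (each one drops a char)
def pvLimpiarWhile (fuel : Nat) (prev : List Char) (final : List Char) : List Char :=
  match fuel with
  | 0 => final
  | n + 1 =>
    if PySem.Chars.endswith final prev &&
       decide (1 < PySem.Chars.count final (PySem.List.slice prev (some (-1)) none)) then
      pvLimpiarWhile n prev final.dropLast
    else final

def limpiar_caracteres_repetidos (texto : String) : String :=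
  let p1 := texto.toList.foldl pvLimpiarStep1 (([] : List Char), ([] : List Char), (0 : Int))
  let p2 := p1.1.foldl pvLimpiarStep2 (([] : List Char), ([] : List Char), (0 : Int))
  if 5 < p2.2.2 ∧ p2.2.1 ≠ [] then String.ofList (pvLimpiarWhile p2.1.length p2.2.1 p2.1)
  else String.ofList p2.1

-- ===== PORT B =====
-- groupby key: c.lower() if c.isalpha() else c
def pvKey (c : Char) : Char := if PySem.Chars.isalpha c then PySem.Chars.lowerChar c else c

-- one grouping pass: split off each maximal equal-key run, cap it at 5 if alphabetic
def pvAltGo : List Char → List Char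
  | [] => []
  | c :: t =>
    (if PySem.Chars.isalpha c then (c :: t.takeWhile (fun d => pvKey d == pvKey c)).take 5
     else c :: t.takeWhile (fun d => pvKey d == pvKey c)) ++
    pvAltGo (t.dropWhile (fun d => pvKey d == pvKey c))
termination_by l => l.length
decreasing_by simpa using Nat.lt_succ_of_le (t.length_dropWhile_le _)

def limpiar_caracteres_repetidos_alt (texto : String) : String :=
  String.ofList (pvAltGo texto.toList)

-- ===== PRECONDITION & SPEC =====
def Spec_limpiar_caracteres_repetidos (texto : String) (out : String) : Prop := out = limpiar_caracteres_repetidos_alt texto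
instance (texto : String) (out : String) : Decidable (Spec_limpiar_caracteres_repetidos texto out) := by unfold Spec_limpiar_caracteres_repetidos; infer_instance

-- ===== CLAIM (what is proved, stated in full; the proofs are below) =====
def Claim_equal_limpiar_caracteres_repetidos : Prop := ∀ (texto : String), Dom_limpiar_caracteres_repetidos texto → Spec_limpiar_caracteres_repetidos texto (limpiar_caracteres_repetidos texto)

-- ===== LEMMAS AND PROOFS =====

theorem pv_isupper_iff (c : Char) : PySem.Chars.isupper c = true ↔ 65 ≤ c.toNat ∧ c.toNat ≤ 90 := by
  simp [PySem.Chars.isupper, Char.le_def, UInt32.le_iff_toNat_le]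
theorem pv_islower_iff (c : Char) : PySem.Chars.islower c = true ↔ 97 ≤ c.toNat ∧ c.toNat ≤ 122 := by
  simp [PySem.Chars.islower, Char.le_def, UInt32.le_iff_toNat_le]
theorem pv_lowerChar_self (c : Char) (h : PySem.Chars.isalpha c = false) : PySem.Chars.lowerChar c = c := by
  simp [PySem.Chars.isalpha] at h
  simp [PySem.Chars.lowerChar, h.1]
theorem pv_lowerChar_alpha (c : Char) (h : PySem.Chars.isalpha c = true) :
    PySem.Chars.isalpha (PySem.Chars.lowerChar c) = true := by
  simp [PySem.Chars.isalpha] at h ⊢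
  rcases h with h | h
  · right
    rw [pv_isupper_iff] at h
    unfold PySem.Chars.lowerChar
    rw [if_pos ((pv_isupper_iff c).2 h)]
    rw [pv_islower_iff, Char.toNat_ofNat, if_pos (Or.inl (by omega))]
    omega
  · right
    rw [pv_islower_iff] at h ⊢
    rwa [PySem.Chars.lowerChar, if_neg (by rw [pv_isupper_iff]; omega)]
theorem pv_cond_nil (c : Char) :
    ((PySem.Chars.lower [c] == PySem.Chars.lower ([] : List Char)) && PySem.Chars.isalpha c) = false := by
  simp [PySem.Chars.lower]
theorem pv_cond_cons (c p : Char) :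
    ((PySem.Chars.lower [c] == PySem.Chars.lower [p]) && PySem.Chars.isalpha c)
      = ((pvKey c == pvKey p) && PySem.Chars.isalpha c) := by
  by_cases hc : PySem.Chars.isalpha c
  · by_cases hp : PySem.Chars.isalpha p
    · simp [PySem.Chars.lower, pvKey, hc, hp]
    · simp only [Bool.not_eq_true] at hp
      simp [PySem.Chars.lower, pvKey, hc, hp, pv_lowerChar_self p hp]
  · simp only [Bool.not_eq_true] at hc
    simp [hc]
theorem pv_keyAlpha (c d : Char) (hc : PySem.Chars.isalpha c = true) (h : pvKey d = pvKey c) :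
    PySem.Chars.isalpha d = true := by
  by_cases hd : PySem.Chars.isalpha d
  · exact hd
  · simp only [Bool.not_eq_true] at hd
    exfalso
    rw [pvKey, pvKey, if_neg (by simp [hd]), if_pos hc] at h
    have := pv_lowerChar_alpha c hc
    rw [← h, hd] at this
    simp at this
theorem pv_keyNonalpha (c d : Char) (hc : PySem.Chars.isalpha c = false) (h : pvKey d = pvKey c) :
    d = c := by
  have hkc : pvKey c = c := by rw [pvKey, if_neg (by simp [hc])]
  rw [hkc, pvKey] at h
  by_cases hd : PySem.Chars.isalpha d
  · exfalso
    rw [if_pos hd] at h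
    have := pv_lowerChar_alpha d hd
    rw [h, hc] at this
    simp at this
  · rwa [if_neg hd] at h
def pvBdry (l : List Char) (prev : List Char) : Prop :=
  ∀ c t, l = c :: t → ((PySem.Chars.lower [c] == PySem.Chars.lower prev) && PySem.Chars.isalpha c) = false
theorem pv_foldl1_run (r : List Char) (c0 : Char) (hc0 : PySem.Chars.isalpha c0 = true)
    (hr : ∀ d ∈ r, pvKey d = pvKey c0) :
    ∀ (acc : List Char) (last : Char), pvKey last = pvKey c0 → ∀ (k : Nat), 1 ≤ k →
    r.foldl pvLimpiarStep1 (acc, [last], (k : Int))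
      = (acc ++ r.take (5 - k), [r.getLastD last], ((k + r.length : Nat) : Int)) := by
  induction r with
  | nil => intro acc last _ k _; simp
  | cons d t ih =>
    intro acc last hl k hk
    have hd : pvKey d = pvKey c0 := hr d (by simp)
    have hda : PySem.Chars.isalpha d = true := pv_keyAlpha c0 d hc0 hd
    have hcond : ((PySem.Chars.lower [d] == PySem.Chars.lower [last]) && PySem.Chars.isalpha d) = true := by
      rw [pv_cond_cons]; simp [hda, hd, hl]
    have hstep : pvLimpiarStep1 (acc, [last], (k : Int)) d
        = (if (k : Int) + 1 ≤ 5 then acc ++ [d] else acc, [d], (k : Int) + 1) := by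
      simp only [pvLimpiarStep1, hcond, if_pos]
    rw [List.foldl_cons, hstep]
    have hcast : (k : Int) + 1 = ((k + 1 : Nat) : Int) := by push_cast; ring
    rw [hcast, ih (fun e he => hr e (by simp [he])) _ d hd (k + 1) (by omega)]
    by_cases h5 : k + 1 ≤ 5
    · rw [if_pos (by exact_mod_cast (by omega : ((k:Int) + 1) ≤ 5))]
      simp only [List.getLastD_cons, List.append_assoc]
      congr 2
      · rw [show 5 - k = (5 - (k+1)) + 1 from by omega]
        simp [List.take_succ_cons]
      · simp only [List.length_cons]; push_cast; omega
    · rw [if_neg (by exact_mod_cast (by omega : ¬ ((k:Int) + 1 ≤ 5)))]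
      simp only [List.getLastD_cons, List.append_assoc]
      congr 2
      · rw [show 5 - k = 0 from by omega, show 5 - (k+1) = 0 from by omega]
        simp
      · simp only [List.length_cons]; push_cast; omega
theorem pv_foldl1_runN (r : List Char) (c0 : Char) (hc0 : PySem.Chars.isalpha c0 = false)
    (hr : ∀ d ∈ r, d = c0) :
    ∀ (acc : List Char) (k : Int),
    r.foldl pvLimpiarStep1 (acc, [c0], k) = (acc ++ r, [c0], if r = [] then k else 1) := by
  induction r with
  | nil => intro acc k; simp
  | cons d t ih =>
    intro acc k
    have hd : d = c0 := hr d (by simp)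
    subst hd
    have hcond : ((PySem.Chars.lower [d] == PySem.Chars.lower [d]) && PySem.Chars.isalpha d) = false := by
      simp [hc0]
    have hstep : pvLimpiarStep1 (acc, [d], k) d = (acc ++ [d], [d], 1) := by
      simp only [pvLimpiarStep1, hcond, Bool.false_eq_true, if_neg, ite_false]
    rw [List.foldl_cons, hstep, ih (fun e he => hr e (by simp [he])) (acc ++ [d]) 1]
    simp
theorem pv_foldl2_run (r : List Char) (c0 : Char) (hc0 : PySem.Chars.isalpha c0 = true)
    (hr : ∀ d ∈ r, pvKey d = pvKey c0) :
    ∀ (acc : List Char) (last : Char), pvKey last = pvKey c0 → ∀ (k : Nat), 1 ≤ k →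
    k + r.length ≤ 5 →
    r.foldl pvLimpiarStep2 (acc, [last], (k : Int))
      = (acc ++ r, [r.getLastD last], ((k + r.length : Nat) : Int)) := by
  induction r with
  | nil => intro acc last _ k _ _; simp
  | cons d t ih =>
    intro acc last hl k hk hb
    have hd : pvKey d = pvKey c0 := hr d (by simp)
    have hda : PySem.Chars.isalpha d = true := pv_keyAlpha c0 d hc0 hd
    have hcond : ((PySem.Chars.lower [d] == PySem.Chars.lower [last]) && PySem.Chars.isalpha d) = true := by
      rw [pv_cond_cons]; simp [hda, hd, hl]
    have hlen : k + (d :: t).length = k + t.length + 1 := by simp [List.length_cons]; omega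
    have hstep : pvLimpiarStep2 (acc, [last], (k : Int)) d = (acc ++ [d], [d], (k : Int) + 1) := by
      simp only [pvLimpiarStep2, hcond, if_pos]
      rw [if_neg (by exact_mod_cast (by omega : ¬ ((5:Int) < (k:Int) + 1)))]
    rw [List.foldl_cons, hstep,
      show (k : Int) + 1 = ((k + 1 : Nat) : Int) from by push_cast; ring,
      ih (fun e he => hr e (by simp [he])) _ d hd (k + 1) (by omega) (by simp at hb ⊢; omega)]
    simp only [List.getLastD_cons, List.append_assoc, List.singleton_append]
    congr 2
    simp only [List.length_cons]; push_cast; omega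
theorem pv_foldl2_runN (r : List Char) (c0 : Char) (hc0 : PySem.Chars.isalpha c0 = false)
    (hr : ∀ d ∈ r, d = c0) :
    ∀ (acc : List Char) (k : Int), k ≤ 5 →
    r.foldl pvLimpiarStep2 (acc, [c0], k) = (acc ++ r, [c0], if r = [] then k else 1) := by
  induction r with
  | nil => intro acc k _; simp
  | cons d t ih =>
    intro acc k hk
    have hd : d = c0 := hr d (by simp)
    subst hd
    have hcond : ((PySem.Chars.lower [d] == PySem.Chars.lower [d]) && PySem.Chars.isalpha d) = false := by
      simp [hc0]
    have hstep : pvLimpiarStep2 (acc, [d], k) d = (acc ++ [d], [d], 1) := by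
      simp only [pvLimpiarStep2, hcond, Bool.false_eq_true, ite_false]
      rw [if_neg (by push_neg; intro h; omega)]
    rw [List.foldl_cons, hstep, ih (fun e he => hr e (by simp [he])) (acc ++ [d]) 1 (by omega)]
    simp
theorem pv_pass1_eq : ∀ (n : Nat) (l : List Char), l.length ≤ n →
    ∀ (acc prev : List Char) (k : Int), pvBdry l prev →
    (l.foldl pvLimpiarStep1 (acc, prev, k)).1 = acc ++ pvAltGo l := by
  intro n
  induction n with
  | zero =>
    intro l hl
    have hnil : l = [] := by cases l <;> simp_all
    subst hnil
    intro acc prev k _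
    simp [pvAltGo]
  | succ n ih =>
    intro l hl acc prev k hb
    match l with
    | [] => simp [pvAltGo]
    | c :: t =>
      have ht : t.length ≤ n := by simpa using hl
      have hstep : pvLimpiarStep1 (acc, prev, k) c = (acc ++ [c], [c], 1) := by
        simp only [pvLimpiarStep1, hb c t rfl, Bool.false_eq_true, ite_false]
      have hrest_len : (t.dropWhile (fun d => pvKey d == pvKey c)).length ≤ n :=
        le_trans (List.length_dropWhile_le _ t) ht
      have hrun : ∀ d ∈ t.takeWhile (fun d => pvKey d == pvKey c), pvKey d = pvKey c :=
        fun d hd => eq_of_beq (List.mem_takeWhile_imp (p := fun d => pvKey d == pvKey c) hd)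
      have hsplit : t.foldl pvLimpiarStep1 (acc ++ [c], [c], (1 : Int))
          = (t.dropWhile (fun d => pvKey d == pvKey c)).foldl pvLimpiarStep1
              ((t.takeWhile (fun d => pvKey d == pvKey c)).foldl pvLimpiarStep1 (acc ++ [c], [c], (1 : Int))) := by
        conv_lhs => rw [← List.takeWhile_append_dropWhile (p := fun d => pvKey d == pvKey c) (l := t)]
        rw [List.foldl_append]
      have hpd : ∀ d t', t.dropWhile (fun d => pvKey d == pvKey c) = d :: t' → (pvKey d == pvKey c) = false := by
        intro d t' heq
        have h0 := List.head?_dropWhile_not (fun d => pvKey d == pvKey c) t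
        rw [heq] at h0
        simpa using h0
      rw [List.foldl_cons, hstep, hsplit]
      by_cases ha : PySem.Chars.isalpha c
      · rw [show (1 : Int) = ((1 : Nat) : Int) from rfl,
          pv_foldl1_run _ c ha hrun (acc ++ [c]) c rfl 1 le_rfl]
        have hklast : pvKey ((t.takeWhile (fun d => pvKey d == pvKey c)).getLastD c) = pvKey c := by
          rcases List.mem_cons.mp (List.getLastD_mem_cons (l := t.takeWhile (fun d => pvKey d == pvKey c)) (a := c)) with h | h
          · rw [h]
          · exact hrun _ h
        have hbd : pvBdry (t.dropWhile (fun d => pvKey d == pvKey c))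
            [(t.takeWhile (fun d => pvKey d == pvKey c)).getLastD c] := by
          intro d t' heq
          rw [pv_cond_cons]
          have : (pvKey d == pvKey ((t.takeWhile (fun d => pvKey d == pvKey c)).getLastD c)) = false := by
            rw [hklast]
            exact hpd d t' heq
          rw [this, Bool.false_and]
        rw [ih _ hrest_len _ _ _ hbd]
        conv_rhs => rw [pvAltGo]
        rw [if_pos ha]
        simp [List.take_succ_cons]
      · have hrunN : ∀ d ∈ t.takeWhile (fun d => pvKey d == pvKey c), d = c := by
          intro d hd
          exact pv_keyNonalpha c d (by simpa using ha) (hrun d hd)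
        rw [pv_foldl1_runN _ c (by simpa using ha) hrunN (acc ++ [c]) 1]
        have hbd : pvBdry (t.dropWhile (fun d => pvKey d == pvKey c)) [c] := by
          intro d t' heq
          rw [pv_cond_cons]
          simp [hpd d t' heq]
        rw [ih _ hrest_len _ _ _ hbd]
        conv_rhs => rw [pvAltGo]
        rw [if_neg ha]
        simp
theorem pv_pass2_eq : ∀ (n : Nat) (l : List Char), l.length ≤ n →
    ∀ (acc prev : List Char) (k : Int), pvBdry l prev → k ≤ 5 →
    ∃ p' k', (pvAltGo l).foldl pvLimpiarStep2 (acc, prev, k) = (acc ++ pvAltGo l, p', k') ∧ k' ≤ 5 := by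
  intro n
  induction n with
  | zero =>
    intro l hl
    have hnil : l = [] := by cases l <;> simp_all
    subst hnil
    intro acc prev k _ hk
    exact ⟨prev, k, by simp [pvAltGo], hk⟩
  | succ n ih =>
    intro l hl acc prev k hb hk
    match l with
    | [] => exact ⟨prev, k, by simp [pvAltGo], hk⟩
    | c :: t =>
      have ht : t.length ≤ n := by simpa using hl
      have hrest_len : (t.dropWhile (fun d => pvKey d == pvKey c)).length ≤ n :=
        le_trans (List.length_dropWhile_le _ t) ht
      have hrun : ∀ d ∈ t.takeWhile (fun d => pvKey d == pvKey c), pvKey d = pvKey c :=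
        fun d hd => eq_of_beq (List.mem_takeWhile_imp (p := fun d => pvKey d == pvKey c) hd)
      have hpd : ∀ d t', t.dropWhile (fun d => pvKey d == pvKey c) = d :: t' → (pvKey d == pvKey c) = false := by
        intro d t' heq
        have h0 := List.head?_dropWhile_not (fun d => pvKey d == pvKey c) t
        rw [heq] at h0
        simpa using h0
      have hstep : pvLimpiarStep2 (acc, prev, k) c = (acc ++ [c], [c], 1) := by
        simp only [pvLimpiarStep2, hb c t rfl, Bool.false_eq_true, ite_false]
        rw [if_neg (by push_neg; intro h; omega)]
      by_cases ha : PySem.Chars.isalpha c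
      · have hgrp : pvAltGo (c :: t)
            = (c :: (t.takeWhile (fun d => pvKey d == pvKey c)).take 4)
              ++ pvAltGo (t.dropWhile (fun d => pvKey d == pvKey c)) := by
          conv_lhs => rw [pvAltGo]
          rw [if_pos ha]
          simp [List.take_succ_cons]
        have hrun4 : ∀ d ∈ (t.takeWhile (fun d => pvKey d == pvKey c)).take 4, pvKey d = pvKey c :=
          fun d hd => hrun d (List.mem_of_mem_take hd)
        have hklast : pvKey (((t.takeWhile (fun d => pvKey d == pvKey c)).take 4).getLastD c) = pvKey c := by
          rcases List.mem_cons.mp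
            (List.getLastD_mem_cons (l := (t.takeWhile (fun d => pvKey d == pvKey c)).take 4) (a := c)) with h | h
          · rw [h]
          · exact hrun4 _ h
        have hbd : pvBdry (t.dropWhile (fun d => pvKey d == pvKey c))
            [((t.takeWhile (fun d => pvKey d == pvKey c)).take 4).getLastD c] := by
          intro d t' heq
          rw [pv_cond_cons]
          have hf : (pvKey d == pvKey (((t.takeWhile (fun d => pvKey d == pvKey c)).take 4).getLastD c)) = false := by
            rw [hklast]
            exact hpd d t' heq
          rw [hf, Bool.false_and]
        have hlen4 : 1 + ((t.takeWhile (fun d => pvKey d == pvKey c)).take 4).length ≤ 5 := by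
          have := List.length_take_le 4 (t.takeWhile (fun d => pvKey d == pvKey c))
          omega
        obtain ⟨p', k', hfold, hk5⟩ := ih _ hrest_len
          ((acc ++ [c]) ++ (t.takeWhile (fun d => pvKey d == pvKey c)).take 4)
          [((t.takeWhile (fun d => pvKey d == pvKey c)).take 4).getLastD c]
          ((1 + ((t.takeWhile (fun d => pvKey d == pvKey c)).take 4).length : Nat) : Int)
          hbd (by exact_mod_cast hlen4)
        refine ⟨p', k', ?_, hk5⟩
        rw [hgrp, List.foldl_append, List.foldl_cons, hstep,
          show (1 : Int) = ((1 : Nat) : Int) from rfl,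
          pv_foldl2_run _ c ha hrun4 (acc ++ [c]) c rfl 1 le_rfl hlen4, hfold]
        simp
      · have hanot : PySem.Chars.isalpha c = false := by simpa using ha
        have hgrp : pvAltGo (c :: t)
            = (c :: t.takeWhile (fun d => pvKey d == pvKey c))
              ++ pvAltGo (t.dropWhile (fun d => pvKey d == pvKey c)) := by
          conv_lhs => rw [pvAltGo]
          rw [if_neg ha]
        have hrunN : ∀ d ∈ t.takeWhile (fun d => pvKey d == pvKey c), d = c :=
          fun d hd => pv_keyNonalpha c d hanot (hrun d hd)
        have hbd : pvBdry (t.dropWhile (fun d => pvKey d == pvKey c)) [c] := by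
          intro d t' heq
          rw [pv_cond_cons, hpd d t' heq, Bool.false_and]
        have hknew : (if t.takeWhile (fun d => pvKey d == pvKey c) = [] then (1 : Int) else 1) ≤ 5 := by
          split <;> omega
        obtain ⟨p', k', hfold, hk5⟩ := ih _ hrest_len
          ((acc ++ [c]) ++ t.takeWhile (fun d => pvKey d == pvKey c)) [c]
          (if t.takeWhile (fun d => pvKey d == pvKey c) = [] then (1 : Int) else 1)
          hbd hknew
        refine ⟨p', k', ?_, hk5⟩
        rw [hgrp, List.foldl_append, List.foldl_cons, hstep,
          pv_foldl2_runN _ c hanot hrunN (acc ++ [c]) 1 (by omega), hfold]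
        simp

-- ===== VERDICT (by name: the statement is the Claim_ definition above) =====
theorem limpiar_caracteres_repetidos_spec : Claim_equal_limpiar_caracteres_repetidos := by
  intro texto _
  unfold Spec_limpiar_caracteres_repetidos limpiar_caracteres_repetidos limpiar_caracteres_repetidos_alt
  have h1 : (texto.toList.foldl pvLimpiarStep1 (([] : List Char), ([] : List Char), (0 : Int))).1
      = pvAltGo texto.toList := by
    simpa using pv_pass1_eq texto.toList.length texto.toList le_rfl [] [] 0
      (fun c t _ => pv_cond_nil c)
  obtain ⟨p', k', h2, hk5⟩ := pv_pass2_eq texto.toList.length texto.toList le_rfl [] [] 0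
    (fun c t _ => pv_cond_nil c) (by norm_num)
  simp only [List.nil_append] at h2
  simp only [h1, h2]
  rw [if_neg (by push_neg; intro h; omega)]
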